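-- pv_equiv track=rewrite | github.com/bohaohuang/transmission_grid | data/preprocess.py | get_boxes_range
-- ===== SOURCE A (Python) =====
-- def get_boxes_range(boxes):
--     h_min, w_min, h_max, w_max = boxes[0][0], boxes[0][1], boxes[0][2], boxes[0][3]
--     if len(boxes) > 1:
--         for cnt in range(1, len(boxes)):
--             if boxes[cnt][0] < h_min:
--                 h_min = boxes[cnt][0]
--             if boxes[cnt][1] < w_min:
--                 w_min = boxes[cnt][1]
--             if boxes[cnt][2] > h_max:
--                 h_max = boxes[cnt][2]
--             if boxes[cnt][3] > w_max:
--                 w_max = boxes[cnt][3]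
--     return h_min, w_min, h_max, w_max
-- ===== SOURCE B (Python) =====
-- def get_boxes_range(boxes):
--     cols = list(zip(*boxes))
--     return min(cols[0]), min(cols[1]), max(cols[2]), max(cols[3])
-- ===== Notes on version B (the rewrite author's own statement) =====
-- stated objective: idiomatic
-- what changed: Replaces A's index-driven loop with sequential if-updates of four scalars by a transpose (zip(*boxes)) into columns aggregated with built-in min/max.
import Mathlib
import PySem

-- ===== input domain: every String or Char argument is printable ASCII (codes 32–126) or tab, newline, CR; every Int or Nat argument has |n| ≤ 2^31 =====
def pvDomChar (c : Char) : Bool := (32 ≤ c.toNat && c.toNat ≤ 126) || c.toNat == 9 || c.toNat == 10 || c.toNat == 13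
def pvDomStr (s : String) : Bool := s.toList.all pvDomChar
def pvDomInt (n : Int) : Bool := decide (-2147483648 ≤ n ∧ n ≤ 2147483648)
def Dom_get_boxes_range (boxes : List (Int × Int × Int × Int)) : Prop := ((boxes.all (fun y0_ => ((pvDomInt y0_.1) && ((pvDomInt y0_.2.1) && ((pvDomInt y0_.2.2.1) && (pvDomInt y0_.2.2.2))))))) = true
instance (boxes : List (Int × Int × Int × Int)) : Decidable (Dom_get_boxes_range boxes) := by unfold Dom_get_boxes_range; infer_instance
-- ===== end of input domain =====

-- B transposes the boxes into columns and aggregates them with built-in min/max (idiomatic); A scans row-major with four if-updated scalars.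

-- ===== PORT A =====
def get_boxes_range (boxes : List (Int × Int × Int × Int)) : Int × Int × Int × Int :=
  let b0 := PySem.List.pyGetD boxes 0 (0, 0, 0, 0)   -- index valid under Pre_
  let init := (b0.1, b0.2.1, b0.2.2.1, b0.2.2.2)
  if boxes.length > 1 then
    (PySem.List.pyRange 1 (boxes.length : Int) 1).foldl (fun st cnt =>
      let b := PySem.List.pyGetD boxes cnt (0, 0, 0, 0)
      let hmin := if b.1 < st.1 then b.1 else st.1
      let wmin := if b.2.1 < st.2.1 then b.2.1 else st.2.1
      let hmax := if b.2.2.1 > st.2.2.1 then b.2.2.1 else st.2.2.1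
      let wmax := if b.2.2.2 > st.2.2.2 then b.2.2.2 else st.2.2.2
      (hmin, wmin, hmax, wmax)) init
  else init

-- ===== PORT B =====
def get_boxes_range_alt (boxes : List (Int × Int × Int × Int)) : Int × Int × Int × Int :=
  let c0 := boxes.map (·.1)
  let c1 := boxes.map (·.2.1)
  let c2 := boxes.map (·.2.2.1)
  let c3 := boxes.map (·.2.2.2)
  ((PySem.List.min? c0 (fun x => x)).getD 0,
   (PySem.List.min? c1 (fun x => x)).getD 0,
   (PySem.List.max? c2 (fun x => x)).getD 0,
   (PySem.List.max? c3 (fun x => x)).getD 0)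

-- ===== PRECONDITION & SPEC =====
-- Both A and B raise IndexError on the empty list; Pre_ excludes exactly it.
def Pre_get_boxes_range (boxes : List (Int × Int × Int × Int)) : Prop := boxes ≠ []
instance (boxes : List (Int × Int × Int × Int)) : Decidable (Pre_get_boxes_range boxes) := by unfold Pre_get_boxes_range; infer_instance
def pvWitness_get_boxes_range : (List (Int × Int × Int × Int)) := [(1, 2, 3, 4), (0, 5, 7, 2)]

def Spec_get_boxes_range (boxes : List (Int × Int × Int × Int)) (out : Int × Int × Int × Int) : Prop := out = get_boxes_range_alt boxes
instance (boxes : List (Int × Int × Int × Int)) (out : Int × Int × Int × Int) : Decidable (Spec_get_boxes_range boxes out) := by unfold Spec_get_boxes_range; infer_instance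

-- ===== CLAIM (what is proved, stated in full; the proofs are below) =====
def Claim_equal_get_boxes_range : Prop := ∀ (boxes : List (Int × Int × Int × Int)), Dom_get_boxes_range boxes → Pre_get_boxes_range boxes → Spec_get_boxes_range boxes (get_boxes_range boxes)

-- ===== LEMMAS AND PROOFS =====

-- A's loop body, componentwise, is min/max accumulation.
theorem foldA_eq (t : List (Int × Int × Int × Int)) :
    ∀ (h w H W : Int),
      t.foldl (fun (st : Int × Int × Int × Int) (b : Int × Int × Int × Int) =>
        (min st.1 b.1, min st.2.1 b.2.1, max st.2.2.1 b.2.2.1, max st.2.2.2 b.2.2.2)) (h, w, H, W)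
      = ((t.map (·.1)).foldl min h, (t.map (·.2.1)).foldl min w,
         (t.map (·.2.2.1)).foldl max H, (t.map (·.2.2.2)).foldl max W) := by
  induction t with
  | nil => intro h w H W; simp
  | cons b t ih =>
    intro h w H W
    simp only [List.foldl_cons, List.map_cons, ih]

theorem get_boxes_range_spec : Claim_equal_get_boxes_range := by
  intro boxes _ hpre
  unfold Spec_get_boxes_range get_boxes_range get_boxes_range_alt
  obtain ⟨b, t, rfl⟩ : ∃ b t, boxes = b :: t := by
    cases boxes with
    | nil => exact absurd rfl hpre
    | cons b t => exact ⟨b, t, rfl⟩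
  simp only [PySem.List.min?_id_cons, PySem.List.max?_id_cons, List.map_cons, Option.getD_some]
  by_cases hlen : (b :: t).length > 1
  · simp only [hlen, if_true]
    have e1 : ∀ a c : Int, (if c < a then c else a) = min a c := by
      intro a c; rw [min_def]; split_ifs <;> omega
    have e2 : ∀ a c : Int, (if c > a then c else a) = max a c := by
      intro a c; rw [max_def]; split_ifs <;> omega
    simp only [e1, e2]
    rw [show ((b :: t).length : Int) = (PySem.List.len (b :: t)) by simp [PySem.List.len]]
    have hb : PySem.List.pyGetD (b :: t) 0 ((0 : Int), (0 : Int), (0 : Int), (0 : Int)) = b := by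
      simp [PySem.List.pyGetD]
    rw [hb]
    rw [PySem.List.foldl_pyRange_pyGetD (xs := b :: t) (d := ((0 : Int), (0 : Int), (0 : Int), (0 : Int)))
        (f := fun (st : Int × Int × Int × Int) (bb : Int × Int × Int × Int) =>
          (min st.1 bb.1, min st.2.1 bb.2.1, max st.2.2.1 bb.2.2.1, max st.2.2.2 bb.2.2.2))
        (init := (b.1, b.2.1, b.2.2.1, b.2.2.2)) (a := 1) (by norm_num)]
    simp only [Int.toNat_one, List.drop_succ_cons, List.drop_zero]
    rw [foldA_eq]
  · simp only [hlen, if_false]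
    have : t = [] := by
      cases t with
      | nil => rfl
      | cons x s => simp at hlen
    subst this
    simp [PySem.List.pyGetD]
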